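-- pv_equiv track=rewrite | github.com/pypi-data/pypi-mirror-377 | packages/mcp-openstack-ops/mcp_openstack_ops-1.0.6-py3-none-any.whl/mcp_openstack_ops/mcp_main.py | parse_prompt_sections
-- ===== SOURCE A (Python) =====
-- from typing import Any, Optional, Dict, List
--
-- def parse_prompt_sections(template: str) -> tuple[List[str], List[str]]:
--     """Parse the prompt template into sections."""
--     lines = template.split('\n')
--     headings = []
--     sections = []
--     current_section = []
--
--     for line in lines:
--         if line.startswith('## '):
--             if current_section:
--                 sections.append('\n'.join(current_section))
--                 current_section = []
--             heading = line[3:].strip()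
--             headings.append(heading)
--             current_section.append(line)
--         else:
--             current_section.append(line)
--
--     if current_section:
--         sections.append('\n'.join(current_section))
--
--     return headings, sections
-- ===== SOURCE B (Python) =====
-- def parse_prompt_sections(template: str) -> tuple:
--     """Parse the prompt template into sections (block-scanning rewrite)."""
--     lines = template.split('\n')
--     headings = []
--     sections = []
--     i, n = 0, len(lines)
--     while i < n:
--         j = i + 1
--         while j < n and not lines[j].startswith('## '):
--             j += 1
--         first = lines[i]
--         if first.startswith('## '):
--             headings.append(first[3:].strip())
--         sections.append('\n'.join(lines[i:j]))
--         i = j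
--     return headings, sections
-- ===== Notes on version B (the rewrite author's own statement) =====
-- stated objective: alternative
-- what changed: A's accumulate-and-flush loop over single lines (with a pending current_section buffer and an after-loop flush) is replaced by a block-scanning loop that finds the next heading-marker boundary and emits each whole section slice at once, so no pending buffer or final flush exists.
import Mathlib
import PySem

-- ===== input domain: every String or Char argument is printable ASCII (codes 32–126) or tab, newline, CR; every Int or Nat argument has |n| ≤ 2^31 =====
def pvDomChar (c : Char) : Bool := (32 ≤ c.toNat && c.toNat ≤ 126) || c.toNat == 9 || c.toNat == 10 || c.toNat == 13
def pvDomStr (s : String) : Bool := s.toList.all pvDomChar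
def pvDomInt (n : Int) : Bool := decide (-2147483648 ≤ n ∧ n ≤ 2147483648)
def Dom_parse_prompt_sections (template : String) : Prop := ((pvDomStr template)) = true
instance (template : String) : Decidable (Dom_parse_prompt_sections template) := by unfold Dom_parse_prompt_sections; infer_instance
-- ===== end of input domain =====

-- B replaces A's accumulate-and-flush line loop by a block-scanning loop that emits each
-- whole heading-delimited section slice at once (objective: alternative decomposition; same cost).

-- ===== PORT A =====
-- line.startswith('## ')
def pvIsHead (s : String) : Bool := PySem.Str.startswith s "## "
-- line[3:].strip()
def pvHead (s : String) : String := PySem.Str.strip (PySem.Str.slice s (some 3) none)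

-- loop body of A: state = (headings, sections, current_section)
def pvStepA (st : List String × List String × List String) (line : String) :
    List String × List String × List String :=
  let hs := st.1; let ss := st.2.1; let cur := st.2.2
  if pvIsHead line then
    -- if current_section: flush it and reset
    let p := if cur.isEmpty then (ss, cur) else (ss ++ [PySem.Str.join "\n" cur], ([] : List String))
    (hs ++ [pvHead line], p.1, p.2 ++ [line])
  else
    (hs, ss, cur ++ [line])

def parse_prompt_sections (template : String) : List String × List String :=
  let lines := (PySem.Str.split? template "\n").getD []
  let st := lines.foldl pvStepA ([], [], [])
  (st.1, if st.2.2.isEmpty then st.2.1 else st.2.1 ++ [PySem.Str.join "\n" st.2.2])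

-- ===== PORT B =====
-- one outer-loop step of B per call: the inner 'while j < n and not startswith' scan is the
-- takeWhile/dropWhile split of the remaining lines at the next '## ' boundary
def pvGo : List String → List String × List String
  | [] => ([], [])
  | l :: rest =>
    let pre := rest.takeWhile (fun s => !pvIsHead s)
    let rest' := rest.dropWhile (fun s => !pvIsHead s)
    let res := pvGo rest'
    let block := PySem.Str.join "\n" (l :: pre)
    if pvIsHead l then (pvHead l :: res.1, block :: res.2)
    else (res.1, block :: res.2)
termination_by ls => ls.length
decreasing_by
  have h := List.length_dropWhile_le (fun s => !pvIsHead s) rest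
  simp; omega

def parse_prompt_sections_alt (template : String) : List String × List String :=
  pvGo ((PySem.Str.split? template "\n").getD [])

-- ===== PRECONDITION & SPEC =====
def Spec_parse_prompt_sections (template : String) (out : List String × List String) : Prop := out = parse_prompt_sections_alt template
instance (template : String) (out : List String × List String) : Decidable (Spec_parse_prompt_sections template out) := by unfold Spec_parse_prompt_sections; infer_instance

-- ===== CLAIM (what is proved, stated in full; the proofs are below) =====
def Claim_equal_parse_prompt_sections : Prop := ∀ (template : String), Dom_parse_prompt_sections template → Spec_parse_prompt_sections template (parse_prompt_sections template)

-- ===== LEMMAS AND PROOFS =====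

-- one-step unfolding of pvGo (well-founded recursion), used by the proofs below
theorem pvGo_cons (l : String) (rest : List String) :
    pvGo (l :: rest) =
      (if pvIsHead l then
         (pvHead l :: (pvGo (rest.dropWhile (fun s => !pvIsHead s))).1,
          PySem.Str.join "\n" (l :: rest.takeWhile (fun s => !pvIsHead s))
            :: (pvGo (rest.dropWhile (fun s => !pvIsHead s))).2)
       else
         ((pvGo (rest.dropWhile (fun s => !pvIsHead s))).1,
          PySem.Str.join "\n" (l :: rest.takeWhile (fun s => !pvIsHead s))
            :: (pvGo (rest.dropWhile (fun s => !pvIsHead s))).2)) := by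
  rw [pvGo.eq_def]

-- the after-loop flush of A
def pvFinish (st : List String × List String × List String) : List String × List String :=
  (st.1, if st.2.2.isEmpty then st.2.1 else st.2.1 ++ [PySem.Str.join "\n" st.2.2])

-- loop invariant: running A's loop from a NONEMPTY pending buffer `cur` and then flushing
-- equals: one block made of `cur` plus the lines up to the next heading, then B's blocks.
theorem pvLoop_eq_go (ls : List String) :
    ∀ (hs ss cur : List String), cur ≠ [] →
    pvFinish (ls.foldl pvStepA (hs, ss, cur)) =
      (hs ++ (pvGo (ls.dropWhile (fun s => !pvIsHead s))).1,
       ss ++ [PySem.Str.join "\n" (cur ++ ls.takeWhile (fun s => !pvIsHead s))]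
          ++ (pvGo (ls.dropWhile (fun s => !pvIsHead s))).2) := by
  induction ls with
  | nil =>
      intro hs ss cur hcur
      simp [pvFinish, List.isEmpty_iff, hcur, pvGo]
  | cons x xs ih =>
      intro hs ss cur hcur
      by_cases hx : pvIsHead x = true
      · have hstep : pvStepA (hs, ss, cur) x
            = (hs ++ [pvHead x], ss ++ [PySem.Str.join "\n" cur], [x]) := by
          simp [pvStepA, hx, List.isEmpty_iff, hcur]
        rw [List.foldl_cons, hstep, ih _ _ [x] (by simp)]
        simp [pvGo_cons, hx]
      · rw [List.foldl_cons]
        have hstep : pvStepA (hs, ss, cur) x = (hs, ss, cur ++ [x]) := by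
          simp [pvStepA, hx]
        rw [hstep, ih _ _ (cur ++ [x]) (by simp)]
        simp [hx]

theorem pvA_eq_go (ls : List String) :
    pvFinish (ls.foldl pvStepA ([], [], [])) = pvGo ls := by
  cases ls with
  | nil => simp [pvFinish, pvGo]
  | cons x xs =>
      by_cases hx : pvIsHead x = true
      · have hstep : pvStepA ([], [], []) x = ([pvHead x], [], [x]) := by
          simp [pvStepA, hx]
        rw [List.foldl_cons, hstep, pvLoop_eq_go xs _ _ [x] (by simp)]
        simp [pvGo_cons, hx]
      · have hstep : pvStepA ([], [], []) x = ([], [], [x]) := by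
          simp [pvStepA, hx]
        rw [List.foldl_cons, hstep, pvLoop_eq_go xs _ _ [x] (by simp)]
        simp [pvGo_cons, hx]

-- ===== VERDICT (by name: the statement is the Claim_ definition above) =====
theorem parse_prompt_sections_spec : Claim_equal_parse_prompt_sections := by
  intro template _
  show _ = _
  unfold parse_prompt_sections parse_prompt_sections_alt
  exact pvA_eq_go ((PySem.Str.split? template "\n").getD [])
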